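-- pv_equiv track=rewrite | github.com/bicyclespokesperson/vim_golf_benchmark | src/executor.py | _process_keystrokes
-- ===== SOURCE A (Python) =====
-- def _process_keystrokes(keystrokes: str) -> str:
--     """Convert special key sequences to actual control characters"""
--     # Common Vim key mappings
--     key_mappings = {
--         "<Esc>": "\x1b",  # Escape
--         "<C-c>": "\x03",  # Ctrl-C
--         "<C-x>": "\x18",  # Ctrl-X
--         "<C-y>": "\x19",  # Ctrl-Y
--         "<C-z>": "\x1a",  # Ctrl-Z
--         "<C-a>": "\x01",  # Ctrl-A
--         "<C-b>": "\x02",  # Ctrl-B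
--         "<C-d>": "\x04",  # Ctrl-D
--         "<C-e>": "\x05",  # Ctrl-E
--         "<C-f>": "\x06",  # Ctrl-F
--         "<C-g>": "\x07",  # Ctrl-G
--         "<C-h>": "\x08",  # Ctrl-H (Backspace)
--         "<C-i>": "\x09",  # Ctrl-I (Tab)
--         "<C-j>": "\x0a",  # Ctrl-J (Enter)
--         "<C-k>": "\x0b",  # Ctrl-K
--         "<C-l>": "\x0c",  # Ctrl-L
--         "<C-m>": "\x0d",  # Ctrl-M (Enter)
--         "<C-n>": "\x0e",  # Ctrl-N
--         "<C-o>": "\x0f",  # Ctrl-O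
--         "<C-p>": "\x10",  # Ctrl-P
--         "<C-q>": "\x11",  # Ctrl-Q
--         "<C-r>": "\x12",  # Ctrl-R
--         "<C-s>": "\x13",  # Ctrl-S
--         "<C-t>": "\x14",  # Ctrl-T
--         "<C-u>": "\x15",  # Ctrl-U
--         "<C-v>": "\x16",  # Ctrl-V
--         "<C-w>": "\x17",  # Ctrl-W
--         "<CR>": "\x0d",  # Carriage return
--         "<Tab>": "\x09",  # Tab
--         "<BS>": "\x08",  # Backspace
--         "<Up>": "\x1b[A",  # Arrow up
--         "<Down>": "\x1b[B",  # Arrow down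
--         "<Right>": "\x1b[C",  # Arrow right
--         "<Left>": "\x1b[D",  # Arrow left
--     }
--
--     processed = keystrokes
--     for key_seq, control_char in key_mappings.items():
--         processed = processed.replace(key_seq, control_char)
--
--     return processed
-- ===== SOURCE B (Python) =====
-- # Single left-to-right scan: each "<name>" token is resolved by computing
-- # Ctrl characters arithmetically (chr(ord(letter)-96)) plus an 8-entry table,
-- # instead of 34 sequential full-string replace passes.
-- _SPECIAL = {
--     "Esc": "\x1b", "CR": "\x0d", "Tab": "\x09", "BS": "\x08",
--     "Up": "\x1b[A", "Down": "\x1b[B", "Right": "\x1b[C", "Left": "\x1b[D",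
-- }
--
-- def _lookup(name):
--     if len(name) == 3 and name.startswith("C-") and 'a' <= name[2] <= 'z':
--         return chr(ord(name[2]) - 96)
--     return _SPECIAL.get(name)
--
-- def _process_keystrokes(keystrokes: str) -> str:
--     """Convert special key sequences to actual control characters"""
--     out = []
--     i = 0
--     n = len(keystrokes)
--     while i < n:
--         if keystrokes[i] == '<':
--             end = keystrokes.find('>', i)
--             if end != -1:
--                 rep = _lookup(keystrokes[i + 1:end])
--                 if rep is not None:
--                     out.append(rep)
--                     i = end + 1
--                     continue
--         out.append(keystrokes[i])
--         i += 1
--     return ''.join(out)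
-- ===== Notes on version B (the rewrite author's own statement) =====
-- stated objective: alternative
-- what changed: Replaces A's 34 sequential full-string str.replace passes by a single left-to-right scan that resolves each angle-bracketed token once, computing Ctrl-letter characters arithmetically via chr(ord(c)-96) and keeping only an eight-entry table for the named keys; correct because no key is a prefix of another and replacement outputs never contain the opening bracket.
import Mathlib
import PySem

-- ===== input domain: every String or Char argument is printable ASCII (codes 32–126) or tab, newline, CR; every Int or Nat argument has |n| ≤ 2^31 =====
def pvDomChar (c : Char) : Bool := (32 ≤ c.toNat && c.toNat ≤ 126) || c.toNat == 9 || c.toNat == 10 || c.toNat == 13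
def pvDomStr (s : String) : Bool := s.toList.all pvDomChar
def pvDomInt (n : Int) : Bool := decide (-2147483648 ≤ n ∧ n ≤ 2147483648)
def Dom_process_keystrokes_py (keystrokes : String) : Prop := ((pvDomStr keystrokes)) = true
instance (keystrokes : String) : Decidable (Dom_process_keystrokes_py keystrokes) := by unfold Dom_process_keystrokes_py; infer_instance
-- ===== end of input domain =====

-- B replaces A's 34 sequential full-string .replace() passes by one left-to-right scan resolving
-- each "<name>" token once, computing Ctrl characters arithmetically (objective: alternative;
-- return value proved identical).

-- ===== PORT A =====
-- the dict literal of A, as its items() in insertion order (keys distinct)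
def pvPairs : List (String × String) :=
  [("<Esc>", "\x1b"), ("<C-c>", "\x03"), ("<C-x>", "\x18"), ("<C-y>", "\x19"),
   ("<C-z>", "\x1a"), ("<C-a>", "\x01"), ("<C-b>", "\x02"), ("<C-d>", "\x04"),
   ("<C-e>", "\x05"), ("<C-f>", "\x06"), ("<C-g>", "\x07"), ("<C-h>", "\x08"),
   ("<C-i>", "\x09"), ("<C-j>", "\x0a"), ("<C-k>", "\x0b"), ("<C-l>", "\x0c"),
   ("<C-m>", "\x0d"), ("<C-n>", "\x0e"), ("<C-o>", "\x0f"), ("<C-p>", "\x10"),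
   ("<C-q>", "\x11"), ("<C-r>", "\x12"), ("<C-s>", "\x13"), ("<C-t>", "\x14"),
   ("<C-u>", "\x15"), ("<C-v>", "\x16"), ("<C-w>", "\x17"), ("<CR>", "\x0d"),
   ("<Tab>", "\x09"), ("<BS>", "\x08"), ("<Up>", "\x1b[A"), ("<Down>", "\x1b[B"),
   ("<Right>", "\x1b[C"), ("<Left>", "\x1b[D")]

-- 'for key_seq, control_char in key_mappings.items(): processed = processed.replace(...)'
def process_keystrokes_py (keystrokes : String) : String :=
  pvPairs.foldl (fun processed kv => PySem.Str.replace processed kv.1 kv.2) keystrokes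

-- ===== PORT B =====
-- Source B's _SPECIAL dict (8 entries), on the character-list side
def pvSpecial : List (List Char × List Char) :=
  [(['E','s','c'], ['\x1b']), (['C','R'], ['\x0d']), (['T','a','b'], ['\x09']),
   (['B','S'], ['\x08']), (['U','p'], ['\x1b','[','A']), (['D','o','w','n'], ['\x1b','[','B']),
   (['R','i','g','h','t'], ['\x1b','[','C']), (['L','e','f','t'], ['\x1b','[','D'])]

-- dict .get: first (= only, keys are distinct) matching key
def pvGet? : List (List Char × List Char) → List Char → Option (List Char)
  | [], _ => none
  | (k, v) :: rest, tok => if tok = k then some v else pvGet? rest tok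

-- Source B's _lookup: 'len(name)==3 and name.startswith("C-") and a<=name[2]<=z' is the
-- pattern ['C','-',c] with 'a' ≤ c ≤ 'z'; chr(ord(c)-96) is Char.ofNat (c.toNat - 96)
def pvLookup (name : List Char) : Option (List Char) :=
  if name.length = 3 ∧ List.take 2 name = ['C', '-'] ∧
      ('a' ≤ name.getD 2 ' ' ∧ name.getD 2 ' ' ≤ 'z') then
    some [Char.ofNat ((name.getD 2 ' ').toNat - 96)]
  else pvGet? pvSpecial name

-- the while loop of Source B, on the suffix starting at i; keystrokes.find('>', i) is
-- PySem.Chars.find on that suffix (both are -1 iff '>' is absent from it),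
-- keystrokes[i+1:end] is List.take (e-1) of the tail, i = end+1 is List.drop (e+1)
def pvScanB : List Char → List Char
  | [] => []
  | c :: t =>
    if c = '<' then
      if PySem.Chars.find (c :: t) ['>'] = -1 then c :: pvScanB t
      else
        match pvLookup (List.take ((PySem.Chars.find (c :: t) ['>']).toNat - 1) t) with
        | some rep => rep ++ pvScanB (List.drop ((PySem.Chars.find (c :: t) ['>']).toNat + 1) (c :: t))
        | none => c :: pvScanB t
    else c :: pvScanB t
  termination_by l => l.length
  decreasing_by
    all_goals simp [List.length_drop]
    all_goals omega

def process_keystrokes_py_alt (keystrokes : String) : String :=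
  String.ofList (pvScanB keystrokes.toList)

-- ===== PRECONDITION & SPEC =====
def Spec_process_keystrokes_py (keystrokes : String) (out : String) : Prop := out = process_keystrokes_py_alt keystrokes
instance (keystrokes : String) (out : String) : Decidable (Spec_process_keystrokes_py keystrokes out) := by unfold Spec_process_keystrokes_py; infer_instance

-- ===== CLAIM (what is proved, stated in full; the proofs are below) =====
def Claim_equal_process_keystrokes_py : Prop := ∀ (keystrokes : String), Dom_process_keystrokes_py keystrokes → Spec_process_keystrokes_py keystrokes (process_keystrokes_py keystrokes)

-- ===== LEMMAS AND PROOFS =====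

-- A's mapping on the character-list side (proof-side view of A's table)
def pvKM : List (List Char × List Char) := pvPairs.map (fun kv => (kv.1.toList, kv.2.toList))

-- str.replace with nonempty pattern, as a plain structural recursion
def pvRepl (old new : List Char) : List Char → List Char
  | [] => []
  | c :: t =>
    if old.isPrefixOf (c :: t) then new ++ pvRepl old new (List.drop (old.length - 1) t)
    else c :: pvRepl old new t
  termination_by l => l.length
  decreasing_by
    all_goals simp [List.length_drop]
    all_goals omega

def pvFold (km : List (List Char × List Char)) (l : List Char) : List Char :=
  km.foldl (fun acc kv => pvRepl kv.1 kv.2 acc) l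

-- shape of every key: "<…>", nonempty inside, no '<' after the head, only one '>' (the last char),
-- all chars printable; shape of every replacement: nonempty, control-character head, no '<'
def pvGoodKey (k : List Char) : Bool :=
  k.head? == some '<' && k.getLast? == some '>' && decide (2 ≤ k.length) &&
  (k.dropLast.all fun a => decide (a ≠ '>')) &&
  (k.tail.all fun a => decide (a ≠ '<') && decide (32 ≤ a.toNat))

def pvGoodRep (r : List Char) : Bool :=
  ((r.head?.map (fun h => decide (h.toNat < 32))).getD false) && r.all (fun a => decide (a ≠ '<'))

theorem pvKM_good : ∀ kv ∈ pvKM, pvGoodKey kv.1 = true ∧ pvGoodRep kv.2 = true := by decide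

theorem pvKM_nodup : (pvKM.map Prod.fst).Nodup := by decide

theorem pvKM_nonprefix : ∀ p ∈ pvKM, ∀ q ∈ pvKM, p.1 = q.1 ∨ (¬ p.1 <+: q.1 ∧ ¬ q.1 <+: p.1) := by decide

theorem pvPairs_keys_ne_nil : ∀ kv ∈ pvPairs, kv.1.toList ≠ [] := by decide

-- unpacked forms of the shape facts
theorem pvGoodKey_spec {k : List Char} (h : pvGoodKey k = true) :
    ∃ m, k = '<' :: m ∧ m ≠ [] ∧ (∀ a ∈ m, a ≠ '<' ∧ 32 ≤ a.toNat) ∧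
      k.getLast? = some '>' ∧ (∀ a ∈ k.dropLast, a ≠ '>') := by
  unfold pvGoodKey at h
  simp only [Bool.and_eq_true, beq_iff_eq, decide_eq_true_eq, List.all_eq_true] at h
  obtain ⟨⟨⟨⟨h1, h2⟩, h3⟩, h4⟩, h5⟩ := h
  cases k with
  | nil => simp at h1
  | cons c m =>
    simp at h1; subst h1
    refine ⟨m, rfl, ?_, ?_, h2, ?_⟩
    · intro hm; subst hm; simp at h3
    · intro a ha; exact (h5 a (by simpa using ha))
    · intro a ha; exact h4 a ha

theorem pvGoodRep_spec {r : List Char} (h : pvGoodRep r = true) :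
    ∃ hd tl, r = hd :: tl ∧ hd.toNat < 32 ∧ (∀ a ∈ r, a ≠ '<') := by
  unfold pvGoodRep at h
  simp only [Bool.and_eq_true, List.all_eq_true, decide_eq_true_eq] at h
  obtain ⟨h1, h2⟩ := h
  cases r with
  | nil => simp at h1
  | cons hd tl => exact ⟨hd, tl, rfl, by simpa using h1, h2⟩

-- pvRepl equals PySem's str.replace for nonempty patterns
theorem pvRepl_go (old new : List Char) (hold : old ≠ []) :
    ∀ (fuel : Nat) (l acc : List Char), l.length ≤ fuel →
      PySem.Chars.replace.go old new fuel l acc = acc.reverse ++ pvRepl old new l := by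
  intro fuel
  induction fuel with
  | zero =>
    intro l acc hl
    have : l = [] := by cases l <;> simp_all
    subst this
    simp [PySem.Chars.replace.go, pvRepl]
  | succ n ih =>
    intro l acc hl
    cases l with
    | nil => simp [PySem.Chars.replace.go, pvRepl]
    | cons c t =>
      rw [PySem.Chars.replace.go]
      by_cases hp : old.isPrefixOf (c :: t)
      · rw [if_pos hp]
        obtain ⟨o0, o', rfl⟩ : ∃ o0 o', old = o0 :: o' := by
          cases old with | nil => exact absurd rfl hold | cons a b => exact ⟨a, b, rfl⟩
        have hdrop : List.drop (o0 :: o').length (c :: t) = List.drop ((o0 :: o').length - 1) t := by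
          simp [List.drop_succ_cons]
        rw [hdrop, ih _ _ (by simp at hl ⊢; omega)]
        rw [pvRepl, if_pos hp]
        simp
      · rw [if_neg hp, ih _ _ (by simp at hl ⊢; omega)]
        rw [pvRepl, if_neg hp]
        simp

theorem pvRepl_eq_replace (old new l : List Char) (hold : old ≠ []) :
    PySem.Chars.replace l old new = pvRepl old new l := by
  unfold PySem.Chars.replace
  rw [if_neg (by simpa [List.isEmpty_iff] using hold)]
  simpa using pvRepl_go old new hold l.length l [] le_rfl

-- step when the pattern does not match at the front
theorem pvRepl_cons_of_not_prefix {old : List Char} (new : List Char) {c : Char} {t : List Char}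
    (h : ¬ old <+: (c :: t)) : pvRepl old new (c :: t) = c :: pvRepl old new t := by
  rw [pvRepl, if_neg (by simpa [List.isPrefixOf_iff_prefix] using h)]

theorem not_prefix_of_head_ne {old : List Char} {m : List Char} {c : Char}
    (ho : old.head? = some '<') (hc : c ≠ '<') : ¬ old <+: (c :: m) := by
  cases old with
  | nil => simp at ho
  | cons o0 o' =>
    simp at ho; subst ho
    simp [List.cons_prefix_cons]
    intro h; exact absurd h.symm hc

-- firing step
theorem pvRepl_fire (old new u : List Char) (hold : old ≠ []) :
    pvRepl old new (old ++ u) = new ++ pvRepl old new u := by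
  obtain ⟨o0, o', rfl⟩ : ∃ o0 o', old = o0 :: o' := by
    cases old with | nil => exact absurd rfl hold | cons a b => exact ⟨a, b, rfl⟩
  rw [show (o0 :: o') ++ u = o0 :: (o' ++ u) by simp, pvRepl,
    if_pos (by simp [List.isPrefixOf_iff_prefix, List.prefix_append])]
  simp

-- pass-through of a '<'-free segment
theorem pvRepl_pass {old : List Char} (new : List Char) (ho : old.head? = some '<')
    (m : List Char) (hm : ∀ a ∈ m, a ≠ '<') (u : List Char) :
    pvRepl old new (m ++ u) = m ++ pvRepl old new u := by
  induction m with
  | nil => simp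
  | cons a m' ih =>
    rw [List.cons_append, pvRepl_cons_of_not_prefix new
      (not_prefix_of_head_ne ho (hm a (by simp)))]
    rw [ih (fun b hb => hm b (by simp [hb]))]
    simp

-- replacement never creates a new printable prefix
theorem pvRepl_no_create {old new : List Char}
    (hnew : ∃ h n', new = h :: n' ∧ h.toNat < 32) :
    ∀ (l m : List Char), m ≠ [] → (∀ a ∈ m, 32 ≤ a.toNat) → ¬ m <+: l →
      ¬ m <+: pvRepl old new l := by
  intro l
  induction l with
  | nil => intro m hm _ _; simp [pvRepl, List.prefix_nil]; exact hm
  | cons c t ih =>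
    intro m hm hchars hpre
    obtain ⟨a, m', rfl⟩ : ∃ a m', m = a :: m' := by
      cases m with | nil => exact absurd rfl hm | cons a b => exact ⟨a, b, rfl⟩
    by_cases hp : old <+: (c :: t)
    · rw [pvRepl, if_pos (by simpa [List.isPrefixOf_iff_prefix] using hp)]
      obtain ⟨h, n', rfl, hh⟩ := hnew
      rw [List.cons_append]
      rw [List.cons_prefix_cons]
      rintro ⟨rfl, -⟩
      have := hchars a (by simp)
      omega
    · rw [pvRepl_cons_of_not_prefix new hp]
      rw [List.cons_prefix_cons]
      rintro ⟨rfl, hm'⟩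
      cases m' with
      | nil => exact hpre (by simp [List.cons_prefix_cons])
      | cons b m'' =>
        refine ih (b :: m'') (by simp) (fun x hx => hchars x (by simp at hx ⊢; tauto)) ?_ hm'
        intro hcon
        exact hpre (by rw [List.cons_prefix_cons]; exact ⟨rfl, hcon⟩)

-- fold versions -----------------------------------------------------------

theorem pvFold_cons (km : List (List Char × List Char)) (kv : List Char × List Char) (l : List Char) :
    pvFold (kv :: km) l = pvFold km (pvRepl kv.1 kv.2 l) := rfl

theorem pvRepl_nil (old new : List Char) : pvRepl old new [] = [] := by rw [pvRepl]

theorem pvFold_nil (km : List (List Char × List Char)) : pvFold km [] = [] := by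
  induction km with
  | nil => rfl
  | cons kv rest ih => rw [pvFold_cons, pvRepl_nil]; exact ih

-- pass-through of a '<'-free segment through the whole fold
theorem pvFold_pass (m : List Char) (hm : ∀ a ∈ m, a ≠ '<') :
    ∀ (km : List (List Char × List Char)), (∀ kv ∈ km, kv ∈ pvKM) →
      ∀ u, pvFold km (m ++ u) = m ++ pvFold km u := by
  intro km
  induction km with
  | nil => intro _ u; rfl
  | cons kv rest ih =>
    intro hsub u
    obtain ⟨mk, hk, -, -, -, -⟩ := pvGoodKey_spec (pvKM_good kv (hsub kv (by simp))).1
    rw [pvFold_cons, pvRepl_pass kv.2 (by rw [hk]; rfl) m hm u]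
    exact ih (fun x hx => hsub x (by simp [hx])) _

-- an unmatched '<' passes the whole fold
theorem pvFold_lt_cons :
    ∀ (km : List (List Char × List Char)), (∀ kv ∈ km, kv ∈ pvKM) →
      ∀ t, (∀ kv ∈ km, ¬ kv.1 <+: ('<' :: t)) → pvFold km ('<' :: t) = '<' :: pvFold km t := by
  intro km
  induction km with
  | nil => intro _ t _; rfl
  | cons kv rest ih =>
    intro hsub t hnp
    rw [pvFold_cons, pvRepl_cons_of_not_prefix kv.2 (hnp kv (by simp))]
    refine ih (fun x hx => hsub x (by simp [hx])) _ ?_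
    intro x hx
    obtain ⟨mx, hkx, hmx, hchx, -, -⟩ := pvGoodKey_spec (pvKM_good x (hsub x (by simp [hx]))).1
    rw [hkx, List.cons_prefix_cons]
    rintro ⟨-, hcon⟩
    have hnpx : ¬ mx <+: t := by
      have := hnp x (by simp [hx])
      rw [hkx, List.cons_prefix_cons] at this
      intro hc; exact this ⟨rfl, hc⟩
    exact pvRepl_no_create
      (by obtain ⟨hd, tl, hrep, hhd, -⟩ := pvGoodRep_spec (pvKM_good kv (hsub kv (by simp))).2
          exact ⟨hd, tl, hrep, hhd⟩)
      t mx hmx (fun a ha => (hchx a ha).2) hnpx hcon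

-- a key occurrence passes untouched through replaces of other keys
theorem pvRepl_other (o n k : List Char) (hok : pvGoodKey o = true) (hkk : pvGoodKey k = true)
    (hnp : ¬ o <+: k ∧ ¬ k <+: o) (u : List Char) :
    pvRepl o n (k ++ u) = k ++ pvRepl o n u := by
  obtain ⟨mk, rfl, -, hchk, -, -⟩ := pvGoodKey_spec hkk
  obtain ⟨mo, ho, -, -, -, -⟩ := pvGoodKey_spec hok
  have hnot : ¬ o <+: ('<' :: mk) ++ u := by
    intro h
    rcases List.prefix_or_prefix_of_prefix h (List.prefix_append _ u) with h' | h'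
    · exact hnp.1 h'
    · exact hnp.2 h'
  rw [List.cons_append, pvRepl_cons_of_not_prefix n (by simpa using hnot)]
  rw [pvRepl_pass n (by rw [ho]; rfl) mk (fun a ha => (hchk a ha).1) u]
  simp

theorem pvFold_other (k : List Char) (hkk : pvGoodKey k = true) :
    ∀ (km : List (List Char × List Char)),
      (∀ kv ∈ km, kv ∈ pvKM ∧ (¬ kv.1 <+: k ∧ ¬ k <+: kv.1)) →
      ∀ u, pvFold km (k ++ u) = k ++ pvFold km u := by
  intro km
  induction km with
  | nil => intro _ u; rfl
  | cons kv rest ih =>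
    intro hsub u
    rw [pvFold_cons,
      pvRepl_other kv.1 kv.2 k (pvKM_good kv ((hsub kv (by simp)).1)).1 hkk
        (hsub kv (by simp)).2 u]
    exact ih (fun x hx => hsub x (by simp [hx])) _

-- A fires exactly the occurring key
theorem pvFold_fire (k rep : List Char) (hmem : (k, rep) ∈ pvKM) (u : List Char) :
    pvFold pvKM (k ++ u) = rep ++ pvFold pvKM u := by
  obtain ⟨pre, post, hsplit⟩ := List.append_of_mem hmem
  have hgoodk : pvGoodKey k = true := (pvKM_good (k, rep) hmem).1
  have hgoodr : pvGoodRep rep = true := (pvKM_good (k, rep) hmem).2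
  have hknil : k ≠ [] := by
    obtain ⟨m, rfl, -, -, -, -⟩ := pvGoodKey_spec hgoodk; simp
  have hpre : ∀ kv ∈ pre, kv ∈ pvKM ∧ (¬ kv.1 <+: k ∧ ¬ k <+: kv.1) := by
    intro kv hkv
    have hkvmem : kv ∈ pvKM := by rw [hsplit]; simp [hkv]
    refine ⟨hkvmem, ?_⟩
    have hne : kv.1 ≠ k := by
      intro heq
      have := pvKM_nodup
      rw [hsplit, List.map_append, List.map_cons] at this
      have h2 := (List.nodup_append.mp this).2.2
      exact absurd heq (h2 kv.1 (List.mem_map_of_mem hkv) k (by simp))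
    rcases pvKM_nonprefix kv hkvmem (k, rep) hmem with h | h
    · exact absurd h hne
    · exact h
  have hrepch : ∀ a ∈ rep, a ≠ '<' := by
    obtain ⟨-, -, -, -, h⟩ := pvGoodRep_spec hgoodr; exact h
  have hpost : ∀ kv ∈ post, kv ∈ pvKM := by
    intro kv hkv; rw [hsplit]; simp [hkv]
  have key : ∀ x, pvFold pvKM (k ++ x) = rep ++ pvFold post (pvRepl k rep (pvFold pre x)) := by
    intro x
    rw [hsplit]
    show pvFold (pre ++ (k, rep) :: post) (k ++ x) = _
    rw [pvFold, List.foldl_append, ← pvFold, ← pvFold, pvFold_cons]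
    rw [pvFold_other k hgoodk pre hpre x]
    rw [pvRepl_fire k rep _ hknil]
    rw [pvFold_pass rep hrepch post hpost]
  have key2 : pvFold pvKM u = pvFold post (pvRepl k rep (pvFold pre u)) := by
    rw [hsplit]
    show pvFold (pre ++ (k, rep) :: post) u = _
    rw [pvFold, List.foldl_append, ← pvFold, ← pvFold, pvFold_cons]
  rw [key u, key2]

-- B-side lookup lemmas -----------------------------------------------------

theorem pvGet?_mem : ∀ (km : List (List Char × List Char)) (tok v : List Char),
    pvGet? km tok = some v → (tok, v) ∈ km := by
  intro km
  induction km with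
  | nil => intro tok v h; simp [pvGet?] at h
  | cons kv rest ih =>
    intro tok v h
    obtain ⟨k0, v0⟩ := kv
    rw [pvGet?] at h
    by_cases he : tok = k0
    · rw [if_pos he] at h
      simp at h
      simp [he, ← h]
    · rw [if_neg he] at h
      simp [ih tok v h]

theorem pvSpecial_sub : ∀ p ∈ pvSpecial, ('<' :: p.1 ++ ['>'], p.2) ∈ pvKM := by decide

theorem pvCtrl_mem : ∀ n : Nat, 97 ≤ n → n ≤ 122 →
    (['<', 'C', '-', Char.ofNat n, '>'], [Char.ofNat (n - 96)]) ∈ pvKM := by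
  intro n h1 h2
  interval_cases n <;> decide

theorem char_le_ge_toNat {c : Char} (h : 'a' ≤ c ∧ c ≤ 'z') :
    97 ≤ c.toNat ∧ c.toNat ≤ 122 := by
  obtain ⟨h1, h2⟩ := h
  rw [Char.le_def] at h1 h2
  constructor
  · exact UInt32.le_iff_toNat_le.mp h1
  · exact UInt32.le_iff_toNat_le.mp h2

-- every name pvLookup accepts denotes a key of A's table
theorem pvLookup_sound (name v : List Char) (h : pvLookup name = some v) :
    ('<' :: name ++ ['>'], v) ∈ pvKM := by
  rw [pvLookup] at h
  by_cases hc : name.length = 3 ∧ List.take 2 name = ['C', '-'] ∧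
      ('a' ≤ name.getD 2 ' ' ∧ name.getD 2 ' ' ≤ 'z')
  · rw [if_pos hc] at h
    obtain ⟨hl, ht, hz⟩ := hc
    obtain ⟨a, b, c, rfl⟩ : ∃ a b c, name = [a, b, c] := by
      match name, hl with
      | [a, b, c], _ => exact ⟨a, b, c, rfl⟩
    simp [List.take] at ht
    obtain ⟨rfl, rfl⟩ := ht
    simp [List.getD] at hz h
    obtain ⟨h1, h2⟩ := char_le_ge_toNat hz
    have hmem := pvCtrl_mem c.toNat h1 h2
    rw [Char.ofNat_toNat] at hmem
    simpa [← h] using hmem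
  · rw [if_neg hc] at h
    exact pvSpecial_sub _ (pvGet?_mem pvSpecial _ v h)

-- every key of A's table is found by pvLookup under its inner name
theorem pvKM_lookup : ∀ kv ∈ pvKM, pvLookup kv.1.tail.dropLast = some kv.2 := by decide

-- B-side scan lemmas -------------------------------------------------------

-- singleton-prefix utility
theorem singleton_prefix_iff (a : Char) (l : List Char) : [a] <+: l ↔ l.head? = some a := by
  cases l with
  | nil => simp
  | cons c t => simp [List.cons_prefix_cons, eq_comm]

-- B fires exactly the occurring key
theorem pvScanB_fire (k rep : List Char) (hmem : (k, rep) ∈ pvKM) (u : List Char) :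
    pvScanB (k ++ u) = rep ++ pvScanB u := by
  have hgoodk : pvGoodKey k = true := (pvKM_good (k, rep) hmem).1
  obtain ⟨m, rfl, hm, hch, hlast, hdrop⟩ := pvGoodKey_spec hgoodk
  obtain ⟨w, hw⟩ : ∃ w, m = w ++ ['>'] := by
    obtain ⟨l', hl'⟩ := List.getLast?_eq_some_iff.mp hlast
    cases l' with
    | nil =>
      exfalso
      have := congrArg List.head? hl'
      simp at this
    | cons a w =>
      simp at hl'
      exact ⟨w, hl'.2⟩
  set s : List Char := ('<' :: m) ++ u with hs
  have hsc : s = '<' :: (m ++ u) := by simp [hs]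
  have hsplit : s = ('<' :: w) ++ '>' :: u := by simp [hs, hw]
  have hnogt : ∀ a ∈ ('<' :: w), a ≠ '>' := by
    intro a ha
    rcases List.mem_cons.mp ha with h | h
    · subst h; decide
    · refine hdrop a ?_
      have : ('<' :: m).dropLast = '<' :: w := by
        rw [hw, show ('<' :: (w ++ ['>'])) = ('<' :: w) ++ ['>'] by simp, List.dropLast_concat]
      rw [this]; simp [h]
  have hfound : s[w.length + 1]? = some '>' := by
    rw [hsplit, List.getElem?_append_right (by simp)]
    simp
  have hbefore : ∀ i < w.length + 1, s[i]? ≠ some '>' := by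
    intro i hi
    rw [hsplit, List.getElem?_append_left (by simpa using hi)]
    intro hc
    exact hnogt _ (List.mem_of_getElem? hc) rfl
  have hinf : ['>'] <:+: s := by
    rw [hsplit]
    exact ⟨'<' :: w, u, by simp⟩
  have hnn : 0 ≤ PySem.Chars.find s ['>'] := (PySem.Chars.find_nonneg_iff s ['>']).mpr hinf
  obtain ⟨hat, hmin⟩ := PySem.Chars.find_spec hnn
  have hgetat : s[(PySem.Chars.find s ['>']).toNat]? = some '>' := by
    rw [← List.head?_drop]
    exact (singleton_prefix_iff '>' _).mp hat
  have he : (PySem.Chars.find s ['>']).toNat = w.length + 1 := by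
    rcases lt_trichotomy (PySem.Chars.find s ['>']).toNat (w.length + 1) with h | h | h
    · exact absurd hgetat (hbefore _ h)
    · exact h
    · exfalso
      refine hmin (w.length + 1) h ?_
      rw [singleton_prefix_iff, List.head?_drop]
      exact hfound
  have hlen : ('<' :: m).length = w.length + 2 := by simp [hw]
  have htok : List.take ((PySem.Chars.find s ['>']).toNat - 1) (m ++ u) = w := by
    rw [he, hw, Nat.add_sub_cancel,
      show (w ++ ['>']) ++ u = w ++ ('>' :: u) by simp, List.take_left]
  have hdropu : List.drop ((PySem.Chars.find s ['>']).toNat + 1) s = u := by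
    rw [he, show w.length + 1 + 1 = ('<' :: m).length by omega, hs, List.drop_left]
  have hget : pvLookup w = some rep := by
    have := pvKM_lookup ('<' :: m, rep) hmem
    simpa [hw, List.dropLast_concat] using this
  rw [hsc, pvScanB, if_pos rfl, if_neg (by rw [← hsc]; omega), ← hsc, htok, hget, hdropu]

-- B passes an unmatched '<'
theorem pvScanB_lt_cons (t : List Char) (hnp : ∀ kv ∈ pvKM, ¬ kv.1 <+: ('<' :: t)) :
    pvScanB ('<' :: t) = '<' :: pvScanB t := by
  rw [pvScanB, if_pos rfl]
  by_cases hf : PySem.Chars.find ('<' :: t) ['>'] = -1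
  · rw [if_pos hf]
  · rw [if_neg hf]
    rcases hget : pvLookup
        (List.take ((PySem.Chars.find ('<' :: t) ['>']).toNat - 1) t) with _ | rep
    · rfl
    · exfalso
      set s : List Char := '<' :: t with hs
      set e : Nat := (PySem.Chars.find s ['>']).toNat with heq
      have hinfx : ['>'] <:+: s := by
        by_contra hi
        exact hf ((PySem.Chars.find_eq_neg_one_iff s ['>']).mpr hi)
      have hnn : 0 ≤ PySem.Chars.find s ['>'] := (PySem.Chars.find_nonneg_iff s ['>']).mpr hinfx
      obtain ⟨hat, -⟩ := PySem.Chars.find_spec hnn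
      have hgetat : s[e]? = some '>' := by
        rw [← List.head?_drop]
        exact (singleton_prefix_iff '>' _).mp hat
      have he1 : 1 ≤ e := by
        by_contra hc
        have : e = 0 := by omega
        rw [this] at hgetat
        simp [hs] at hgetat
      have helt : e - 1 < t.length := by
        have : e < s.length := (List.getElem?_eq_some_iff.mp hgetat).1
        simp [hs] at this
        omega
      have htgt : t[e - 1]? = some '>' := by
        have : s[e]? = t[e - 1]? := by
          rw [hs, List.getElem?_cons, if_neg (by omega)]
        rw [← this]; exact hgetat
      have hkey := pvLookup_sound _ rep hget
      refine hnp _ hkey ?_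
      show ('<' :: List.take (e - 1) t ++ ['>']) <+: s
      rw [hs, show ('<' :: List.take (e - 1) t ++ ['>']) = '<' :: (List.take (e - 1) t ++ ['>']) from rfl,
        List.cons_prefix_cons]
      refine ⟨rfl, ?_⟩
      have hta : List.take (e - 1) t ++ ['>'] = List.take e t := by
        rw [show e = (e - 1) + 1 by omega, List.take_add_one]
        congr 1
        rw [htgt]
        rfl
      rw [hta]
      exact List.take_prefix e t

-- B passes any other character
theorem pvScanB_cons (c : Char) (t : List Char) (hc : c ≠ '<') :
    pvScanB (c :: t) = c :: pvScanB t := by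
  rw [pvScanB, if_neg hc]

-- master equivalence on character lists
theorem pv_master : ∀ (n : Nat) (l : List Char), l.length ≤ n → pvFold pvKM l = pvScanB l := by
  intro n
  induction n with
  | zero =>
    intro l hl
    have : l = [] := by cases l <;> simp_all
    subst this
    rw [pvFold_nil, pvScanB]
  | succ n ih =>
    intro l hl
    cases l with
    | nil => rw [pvFold_nil, pvScanB]
    | cons c t =>
      by_cases hc : c = '<'
      · subst hc
        by_cases hex : ∃ kv ∈ pvKM, kv.1 <+: ('<' :: t)
        · obtain ⟨⟨k, rep⟩, hmem, hpre⟩ := hex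
          obtain ⟨u, hu⟩ := hpre
          rw [← hu, pvFold_fire k rep hmem u, pvScanB_fire k rep hmem u]
          have hk2 : 2 ≤ k.length := by
            obtain ⟨m, rfl, hm, -, -, -⟩ := pvGoodKey_spec (pvKM_good (k, rep) hmem).1
            cases m with | nil => exact absurd rfl hm | cons _ _ => simp
          have hlen : k.length + u.length = t.length + 1 := by
            have := congrArg List.length hu
            simpa using this
          rw [ih u (by simp at hl; omega)]
        · push_neg at hex
          rw [pvFold_lt_cons pvKM (fun kv h => h) t hex,
            pvScanB_lt_cons t hex, ih t (by simp at hl; omega)]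
      · have : pvFold pvKM (c :: t) = c :: pvFold pvKM t := by
          have := pvFold_pass [c] (by simp [hc]) pvKM (fun kv h => h) t
          simpa using this
        rw [this, pvScanB_cons c t hc, ih t (by simp at hl; omega)]

-- bridge from A's String-level fold to pvFold
theorem pv_bridgeA : ∀ (pairs : List (String × String)), (∀ kv ∈ pairs, kv.1.toList ≠ []) →
    ∀ (s : String),
      (pairs.foldl (fun p kv => PySem.Str.replace p kv.1 kv.2) s).toList =
        pvFold (pairs.map fun kv => (kv.1.toList, kv.2.toList)) s.toList := by
  intro pairs
  induction pairs with
  | nil => intro _ s; rfl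
  | cons kv rest ih =>
    intro hne s
    rw [List.foldl_cons, List.map_cons, pvFold_cons,
      ih (fun x hx => hne x (by simp [hx])) (PySem.Str.replace s kv.1 kv.2)]
    rw [PySem.Str.toList_replace, pvRepl_eq_replace _ _ _ (hne kv (by simp))]

theorem pvKM_eq : (pvPairs.map fun kv => (kv.1.toList, kv.2.toList)) = pvKM := rfl

-- ===== VERDICT (by name: the statement is the Claim_ definition above) =====
theorem process_keystrokes_py_spec : Claim_equal_process_keystrokes_py := by
  intro s _
  unfold Spec_process_keystrokes_py process_keystrokes_py process_keystrokes_py_alt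
  apply String.toList_injective
  rw [String.toList_ofList, pv_bridgeA pvPairs pvPairs_keys_ne_nil s, pvKM_eq,
    pv_master s.toList.length s.toList le_rfl]
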